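-- pv_equiv track=rewrite | github.com/nmr-relax/relax | lib/text/table.py | _table_line
-- ===== SOURCE A (Python) =====
-- MULTI_COL = "@@MULTI@@"
--
-- def _table_line(text=None, widths=None, separator='   ', pad_left=' ', pad_right=' ', prefix=' ', postfix=' ', justification=None):
--     """Format a line of a table.
--
--     @keyword text:          The list of table elements.  If not given, an empty line will be be produced.
--     @type text:             list of str or None
--     @keyword widths:        The list of column widths for the table.
--     @type widths:           list of int
--     @keyword separator:     The column separation string.
--     @type separator:        str
--     @keyword pad_left:      The string to pad the left side of the table with.
--     @type pad_left:         str
--     @keyword pad_right:     The string to pad the right side of the table with.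
--     @type pad_right:        str
--     @keyword prefix:        The text to add to the start of the line.
--     @type prefix:           str
--     @keyword postfix:       The text to add to the end of the line.
--     @type postfix:          str
--     @keyword justification: The cell justification structure.  The elements should be 'l' for left justification and 'r' for right.
--     @type justification:    list of str
--     @return:                The table line.
--     @rtype:                 str
--     """
--
--     # Initialise.
--     line = prefix + pad_left
--     num_col = len(widths)
--
--     # Loop over the columns.
--     for i in range(num_col):
--         # Multicolumn (middle/end).
--         if text[i] == MULTI_COL:
--             continue
--
--         # The column separator.
--         if i > 0:
--             line += separator
--
--         # Multicolumn (start).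
--         if i < num_col-1 and text[i+1] == MULTI_COL:
--             # Find the full multicell width.
--             width = widths[i]
--             for j in range(i+1, num_col):
--                 if text[j] == MULTI_COL:
--                     width += len(separator) + widths[j]
--                 else:
--                     break
--
--             # Add the padded text.
--             if justification[i] == 'l':
--                 line += text[i]
--             line += " " * (width - len(text[i]))
--             if justification[i] == 'r':
--                 line += text[i]
--
--         # Normal cell.
--         else:
--             if justification[i] == 'l':
--                 line += text[i]
--             line += " " * (widths[i] - len(text[i]))
--             if justification[i] == 'r':
--                 line += text[i]
--
--     # Close the line.
--     line += pad_right + postfix + "\n"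
--
--     # Return the text.
--     return line
-- ===== SOURCE B (Python) =====
-- MULTI_COL = "@@MULTI@@"
--
-- def _table_line(text=None, widths=None, separator='   ', pad_left=' ', pad_right=' ', prefix=' ', postfix=' ', justification=None):
--     """Format a line of a table: a reverse prepass folds every multicolumn run
--     into a merged-width table, then a flat forward pass renders the cells."""
--     num_col = len(widths)
--
--     # Pass 1 (reverse): fold each MULTI_COL run into the width of the cell
--     # that starts it, so the render pass needs no lookahead.
--     merged = [0] * num_col
--     carry = 0
--     for i in reversed(range(num_col)):
--         if text[i] == MULTI_COL:
--             carry += len(separator) + widths[i]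
--         else:
--             merged[i] = widths[i] + carry
--             carry = 0
--
--     # Pass 2 (forward): render every starting cell against its merged width.
--     line = prefix + pad_left
--     for i in range(num_col):
--         cell = text[i]
--         if cell == MULTI_COL:
--             continue
--         if i > 0:
--             line += separator
--         pad = " " * (merged[i] - len(cell))
--         if justification[i] == 'l':
--             line += cell
--             line += pad
--             del pad
--         elif justification[i] == 'r':
--             line += pad
--             del pad  # release before the next append reallocates the line
--             line += cell
--         else:
--             line += pad
--             del pad
--
--     line += pad_right
--     line += postfix
--     line += "\n"
--     return line
-- ===== Notes on version B (the rewrite author's own statement) =====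
-- stated objective: alternative
-- what changed: A builds the line in one forward loop whose body re-scans ahead with an inner loop to sum each multicolumn run's width; B makes two staged passes in opposite directions: a reverse prepass folds every multicolumn run into a precomputed merged-width table via a right-to-left carry accumulator, then a flat forward pass (no lookahead, no inner loop) renders each starting cell against its table entry.
import Mathlib
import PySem

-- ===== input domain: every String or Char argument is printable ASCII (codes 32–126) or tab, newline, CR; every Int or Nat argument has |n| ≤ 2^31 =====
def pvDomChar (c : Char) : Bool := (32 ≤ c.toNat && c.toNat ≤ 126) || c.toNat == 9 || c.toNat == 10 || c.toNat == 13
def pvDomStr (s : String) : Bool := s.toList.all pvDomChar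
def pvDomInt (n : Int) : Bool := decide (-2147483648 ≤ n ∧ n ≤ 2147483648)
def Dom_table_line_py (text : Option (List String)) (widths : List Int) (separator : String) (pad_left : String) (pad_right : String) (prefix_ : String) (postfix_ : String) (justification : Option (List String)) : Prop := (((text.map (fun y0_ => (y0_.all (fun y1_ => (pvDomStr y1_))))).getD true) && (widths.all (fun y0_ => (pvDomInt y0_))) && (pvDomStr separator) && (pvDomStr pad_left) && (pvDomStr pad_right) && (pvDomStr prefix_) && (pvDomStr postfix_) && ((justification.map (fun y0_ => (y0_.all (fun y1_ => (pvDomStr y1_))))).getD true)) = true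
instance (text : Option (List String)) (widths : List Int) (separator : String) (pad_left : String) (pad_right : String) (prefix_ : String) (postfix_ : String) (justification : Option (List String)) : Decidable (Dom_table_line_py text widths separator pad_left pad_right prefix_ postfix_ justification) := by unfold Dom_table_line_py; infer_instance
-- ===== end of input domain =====

-- B replaces A's forward loop with inner lookahead by two staged passes: a reverse prepass precomputing merged widths, then a flat forward render pass; alternative structure, same cost.


-- ===== PORT A =====
def pvMULTI : String := "@@MULTI@@"

-- " " * k : exact (Python gives "" for k ≤ 0; Int.toNat clamps negatives to 0)
def pvSpaces (k : Int) : String := String.ofList (List.replicate k.toNat ' ')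

-- inner 'for j in range(i+1, num_col): if text[j]==MULTI_COL: width += len(separator)+widths[j] else: break'
def tlWidthLoop (t : List String) (w : List Int) (seplen : Int) (n j : Nat) (width : Int) : Int :=
  if _h : j < n then
    if t.getD j "" == pvMULTI then tlWidthLoop t w seplen n (j+1) (width + seplen + w.getD j 0)
    else width
  else width
termination_by n - j

-- the 'for i in range(num_col)' loop with the accumulated line
def tlLoopA (t : List String) (w : List Int) (sep : String) (ju : List String) (n i : Nat) (line : String) : String :=
  if _h : i < n then
    if t.getD i "" == pvMULTI then tlLoopA t w sep ju n (i+1) line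
    else
      let line1 := if 0 < i then line ++ sep else line
      let line2 :=
        if i < n - 1 && (t.getD (i+1) "" == pvMULTI) then
          let width := tlWidthLoop t w (PySem.Str.len sep) n (i+1) (w.getD i 0)
          let l3 := if ju.getD i "" == "l" then line1 ++ t.getD i "" else line1
          let l4 := l3 ++ pvSpaces (width - PySem.Str.len (t.getD i ""))
          if ju.getD i "" == "r" then l4 ++ t.getD i "" else l4
        else
          let l3 := if ju.getD i "" == "l" then line1 ++ t.getD i "" else line1
          let l4 := l3 ++ pvSpaces (w.getD i 0 - PySem.Str.len (t.getD i ""))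
          if ju.getD i "" == "r" then l4 ++ t.getD i "" else l4
      tlLoopA t w sep ju n (i+1) line2
  else line
termination_by n - i

-- indexing uses getD defaults; inside Pre_table_line_py every access Python performs is in range
def table_line_py (text : Option (List String)) (widths : List Int) (separator : String) (pad_left : String) (pad_right : String) (prefix_ : String) (postfix_ : String) (justification : Option (List String)) : String :=
  let line := prefix_ ++ pad_left
  let num_col := widths.length
  let line := tlLoopA (text.getD []) widths separator (justification.getD []) num_col 0 line
  line ++ pad_right ++ postfix_ ++ "\n"

-- ===== PORT B =====
-- pass 1 of Source B: 'for i in reversed(range(num_col))' filling the merged-width table;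
-- k counts down, acc holds the already-filled entries for indices k..num_col-1
def tlMerged (t : List String) (w : List Int) (seplen : Int) : Nat → Int → List Int → List Int
  | 0, _, acc => acc
  | k+1, carry, acc =>
      if t.getD k "" == pvMULTI then tlMerged t w seplen k (carry + seplen + w.getD k 0) (0 :: acc)
      else tlMerged t w seplen k 0 ((w.getD k 0 + carry) :: acc)

-- pass 2 of Source B: the flat forward render loop over the merged-width table (no lookahead)
def tlLoopB (t : List String) (merged : List Int) (sep : String) (ju : List String) (n i : Nat) (line : String) : String :=
  if _h : i < n then
    if t.getD i "" == pvMULTI then tlLoopB t merged sep ju n (i+1) line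
    else
      let line1 := if 0 < i then line ++ sep else line
      let pad := pvSpaces (merged.getD i 0 - PySem.Str.len (t.getD i ""))
      let line2 := if ju.getD i "" == "l" then line1 ++ t.getD i "" ++ pad
                   else if ju.getD i "" == "r" then line1 ++ pad ++ t.getD i ""
                   else line1 ++ pad
      tlLoopB t merged sep ju n (i+1) line2
  else line
termination_by n - i

def table_line_py_alt (text : Option (List String)) (widths : List Int) (separator : String) (pad_left : String) (pad_right : String) (prefix_ : String) (postfix_ : String) (justification : Option (List String)) : String :=
  let t := text.getD []
  let ju := justification.getD []
  let num_col := widths.length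
  let merged := tlMerged t widths (PySem.Str.len separator) num_col 0 []
  let line := tlLoopB t merged separator ju num_col 0 (prefix_ ++ pad_left)
  line ++ pad_right ++ postfix_ ++ "\n"

-- ===== PRECONDITION & SPEC =====
-- Exactly the inputs on which Python A returns: with a nonempty widths list it subscripts text[i] for
-- every column and justification[i] for every non-multicolumn cell, raising TypeError/IndexError otherwise.
def Pre_table_line_py (text : Option (List String)) (widths : List Int) (separator : String) (pad_left : String) (pad_right : String) (prefix_ : String) (postfix_ : String) (justification : Option (List String)) : Prop :=
  widths = [] ∨
    (text ≠ none ∧ widths.length ≤ (text.getD []).length ∧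
      ∀ i < widths.length, (text.getD []).getD i "" ≠ "@@MULTI@@" → i < (justification.getD []).length)
instance (text : Option (List String)) (widths : List Int) (separator : String) (pad_left : String) (pad_right : String) (prefix_ : String) (postfix_ : String) (justification : Option (List String)) : Decidable (Pre_table_line_py text widths separator pad_left pad_right prefix_ postfix_ justification) := by unfold Pre_table_line_py; infer_instance

def pvWitness_table_line_py : Option (List String) × List Int × String × String × String × String × String × Option (List String) :=
  (some ["ab"], [4], "|", " ", " ", "(", ")", some ["l"])

def Spec_table_line_py (text : Option (List String)) (widths : List Int) (separator : String) (pad_left : String) (pad_right : String) (prefix_ : String) (postfix_ : String) (justification : Option (List String)) (out : String) : Prop := out = table_line_py_alt text widths separator pad_left pad_right prefix_ postfix_ justification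
instance (text : Option (List String)) (widths : List Int) (separator : String) (pad_left : String) (pad_right : String) (prefix_ : String) (postfix_ : String) (justification : Option (List String)) (out : String) : Decidable (Spec_table_line_py text widths separator pad_left pad_right prefix_ postfix_ justification out) := by unfold Spec_table_line_py; infer_instance

-- ===== CLAIM (what is proved, stated in full; the proofs are below) =====
def Claim_equal_table_line_py : Prop := ∀ (text : Option (List String)) (widths : List Int) (separator : String) (pad_left : String) (pad_right : String) (prefix_ : String) (postfix_ : String) (justification : Option (List String)), Dom_table_line_py text widths separator pad_left pad_right prefix_ postfix_ justification → Pre_table_line_py text widths separator pad_left pad_right prefix_ postfix_ justification → Spec_table_line_py text widths separator pad_left pad_right prefix_ postfix_ justification (table_line_py text widths separator pad_left pad_right prefix_ postfix_ justification)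

-- ===== LEMMAS AND PROOFS =====
-- proof-only helper: the run scan of A's inner loop, also returning its stop index
def tlRun (t : List String) (w : List Int) (seplen : Int) (n j : Nat) (width : Int) : Int × Nat :=
  if _h : j < n then
    if t.getD j "" == pvMULTI then tlRun t w seplen n (j+1) (width + seplen + w.getD j 0)
    else (width, j)
  else (width, j)
termination_by n - j

theorem tlRun_fst (t : List String) (w : List Int) (seplen : Int) (n j : Nat) (width : Int) :
    (tlRun t w seplen n j width).1 = tlWidthLoop t w seplen n j width := by
  fun_induction tlRun <;> rw [tlWidthLoop] <;> simp_all

theorem tlRun_snd_le (t : List String) (w : List Int) (seplen : Int) (n j : Nat) (width : Int)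
    (h : j ≤ n) : (tlRun t w seplen n j width).2 ≤ n := by
  fun_induction tlRun <;> simp_all <;> omega

-- extending the scan bound by one column
theorem tlRun_succ (t : List String) (w : List Int) (seplen : Int) (k j : Nat) (width : Int)
    (h : j ≤ k) :
    tlRun t w seplen (k+1) j width =
      (if (tlRun t w seplen k j width).2 = k ∧ (t.getD k "" == pvMULTI) = true
       then ((tlRun t w seplen k j width).1 + seplen + w.getD k 0, k+1)
       else tlRun t w seplen k j width) := by
  fun_induction tlRun t w seplen k j width with
  | case1 j width hj hm ih =>
      rw [tlRun]
      have hj' : j < k + 1 := by omega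
      rw [dif_pos hj', if_pos hm]
      exact ih (by omega)
  | case2 j width hj hm =>
      rw [tlRun]
      have hj' : j < k + 1 := by omega
      rw [dif_pos hj', if_neg hm]
      rw [if_neg (by rintro ⟨h1, _⟩; omega)]
  | case3 j width hj =>
      have hjk : j = k := by omega
      subst hjk
      rw [tlRun, dif_pos (by omega : j < j + 1)]
      by_cases hm : (t.getD j "" == pvMULTI) = true
      · rw [if_pos hm, tlRun, dif_neg (by omega : ¬ j + 1 < j + 1)]
        rw [if_pos ⟨rfl, hm⟩]
      · rw [if_neg hm, if_neg (by rintro ⟨_, h2⟩; exact hm h2)]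

theorem tlMerged_acc (t : List String) (w : List Int) (seplen : Int) (k : Nat) (carry : Int)
    (acc : List Int) :
    tlMerged t w seplen k carry acc = tlMerged t w seplen k carry [] ++ acc := by
  induction k generalizing carry acc with
  | zero => simp [tlMerged]
  | succ k ih =>
      rw [tlMerged, tlMerged]
      split_ifs with hm
      · rw [ih, ih (acc := [0])]; simp
      · rw [ih, ih (acc := [_])]; simp

theorem tlMerged_length (t : List String) (w : List Int) (seplen : Int) (k : Nat) (carry : Int) :
    (tlMerged t w seplen k carry []).length = k := by
  induction k generalizing carry with
  | zero => simp [tlMerged]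
  | succ k ih =>
      rw [tlMerged]
      split_ifs <;> rw [tlMerged_acc] <;> simp [ih]

-- the merged-width table entry of a starting cell is A's inner-loop width (plus the carry if the
-- multicolumn run reaches the scan bound)
theorem tlMerged_getD (t : List String) (w : List Int) (seplen : Int) (k : Nat) (carry : Int)
    (i : Nat) (hi : i < k) (hm : ¬ (t.getD i "" == pvMULTI) = true) :
    (tlMerged t w seplen k carry []).getD i 0 =
      (tlRun t w seplen k (i+1) (w.getD i 0)).1 +
        (if (tlRun t w seplen k (i+1) (w.getD i 0)).2 = k then carry else 0) := by
  induction k generalizing carry with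
  | zero => omega
  | succ k ih =>
      rw [tlMerged]
      by_cases hik : i < k
      · have hrle : (tlRun t w seplen k (i+1) (w.getD i 0)).2 ≤ k :=
          tlRun_snd_le t w seplen k (i+1) (w.getD i 0) (by omega)
        have hget : ∀ (c : Int) (v : Int),
            (tlMerged t w seplen k c [] ++ [v]).getD i 0 =
              (tlMerged t w seplen k c []).getD i 0 := by
          intro c v
          rw [List.getD, List.getD]
          rw [List.getElem?_append_left (by rw [tlMerged_length]; omega)]
        have hsucc := tlRun_succ t w seplen k (i+1) (w.getD i 0) (by omega)
        by_cases hr : (tlRun t w seplen k (i+1) (w.getD i 0)).2 = k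
        · by_cases hmk : (t.getD k "" == pvMULTI) = true
          · rw [if_pos hmk, tlMerged_acc, hget, ih _ hik, if_pos hr,
                hsucc, if_pos ⟨hr, hmk⟩, if_pos rfl]
            ring
          · rw [if_neg hmk, tlMerged_acc, hget, ih _ hik, if_pos hr,
                hsucc, if_neg (by rintro ⟨_, h2⟩; exact hmk h2)]
            rw [if_neg (by omega : ¬ (tlRun t w seplen k (i+1) (w.getD i 0)).2 = k + 1)]
        · have hne : ¬ ((tlRun t w seplen k (i+1) (w.getD i 0)).2 = k ∧ (t.getD k "" == pvMULTI) = true) := by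
            rintro ⟨h1, _⟩; exact hr h1
          by_cases hmk : (t.getD k "" == pvMULTI) = true
          · rw [if_pos hmk, tlMerged_acc, hget, ih _ hik, if_neg hr, hsucc, if_neg hne,
                if_neg (by omega : ¬ (tlRun t w seplen k (i+1) (w.getD i 0)).2 = k + 1)]
          · rw [if_neg hmk, tlMerged_acc, hget, ih _ hik, if_neg hr, hsucc, if_neg hne,
                if_neg (by omega : ¬ (tlRun t w seplen k (i+1) (w.getD i 0)).2 = k + 1)]
      · have hik' : i = k := by omega
        subst hik'
        rw [if_neg hm, tlMerged_acc]
        have hval : (tlMerged t w seplen i 0 [] ++ [w.getD i 0 + carry]).getD i 0 = w.getD i 0 + carry := by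
          rw [List.getD, List.getElem?_append_right (by rw [tlMerged_length])]
          simp [tlMerged_length]
        rw [hval, tlRun, dif_neg (by omega : ¬ i + 1 < i + 1), if_pos rfl]

-- at the top level (carry = 0, bound = n), the table entry is exactly A's inner-loop width
theorem tlMerged_getD_top (t : List String) (w : List Int) (seplen : Int) (n i : Nat)
    (hi : i < n) (hm : ¬ (t.getD i "" == pvMULTI) = true) :
    (tlMerged t w seplen n 0 []).getD i 0 = tlWidthLoop t w seplen n (i+1) (w.getD i 0) := by
  rw [tlMerged_getD t w seplen n 0 i hi hm, ← tlRun_fst]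
  split_ifs <;> ring

-- in the normal-cell case A's inner loop would return widths[i] unchanged
theorem tlWidthLoop_normal (t : List String) (w : List Int) (seplen : Int) (n i : Nat)
    (hb : ¬ (decide (i < n - 1) && (t.getD (i+1) "" == pvMULTI)) = true) (hi : i < n) :
    tlWidthLoop t w seplen n (i+1) (w.getD i 0) = w.getD i 0 := by
  rw [tlWidthLoop]
  by_cases h1 : i + 1 < n
  · rw [dif_pos h1]
    have : ¬ (t.getD (i+1) "" == pvMULTI) = true := by
      intro hmm; apply hb
      simp only [hmm, Bool.and_true, decide_eq_true_eq]
      omega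
    rw [if_neg this]
  · rw [dif_neg h1]

-- the main invariant: from any column and accumulated line, A's loop (inner lookahead) and
-- B's loop (merged-width table) build the same string
theorem tlLoopA_eq (t : List String) (w : List Int) (sep : String) (ju : List String) (n i : Nat)
    (line : String) :
    tlLoopA t w sep ju n i line =
      tlLoopB t (tlMerged t w (PySem.Str.len sep) n 0 []) sep ju n i line := by
  fun_induction tlLoopA t w sep ju n i line with
  | case1 i line h hm ih =>
      rw [tlLoopB]
      simp only [h, dif_pos, hm, if_pos]
      exact ih
  | case2 i line h hm line1 line2 ih =>
      rw [tlLoopB]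
      simp only [h, dif_pos, hm, Bool.false_eq_true, if_false]
      rw [ih]
      congr 1
      simp only [line2, line1]
      have hmg := tlMerged_getD_top t w (PySem.Str.len sep) n i h hm
      by_cases hb : (decide (i < n - 1) && (t.getD (i+1) "" == pvMULTI)) = true
      · rw [dif_pos hb]
        simp only [← hmg]
        split_ifs <;> simp_all [String.append_assoc]
      · rw [dif_neg hb]
        have hw := tlWidthLoop_normal t w (PySem.Str.len sep) n i hb h
        simp only [hmg, hw]
        split_ifs <;> simp_all [String.append_assoc]
  | case3 i line h =>
      rw [tlLoopB]
      simp [h]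

-- ===== VERDICT (by name: the statement is the Claim_ definition above) =====
theorem table_line_py_spec : Claim_equal_table_line_py := by
  intro text widths separator pad_left pad_right prefix_ postfix_ justification _ _
  unfold Spec_table_line_py table_line_py table_line_py_alt
  simp only [tlLoopA_eq]
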